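-- pv_equiv track=rewrite | github.com/praveenmunivel/Problem_Solving | .github/workflows/countTheTriplets.py | triplets
-- ===== SOURCE A (Python) =====
-- def triplets(arr):
--     n = len(arr)
--     sum,sum2,count=0,0,0
--     for i in range(n):
--         sum = arr[0]
--         arr.pop(0)
--         for j in range(n-1):
--             sum2 = arr[j]+arr[j-1]
--             if(sum2 == sum):
--                 count +=1
--         arr.append(sum)
--     return count
-- ===== SOURCE B (Python) =====
-- def triplets(arr):
--     # O(n): hash-count the n circular adjacent-pair sums once; for each removed
--     # element subtract its two incident pair sums and add the bridge pair.
--     n = len(arr)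
--     s = [arr[k] + arr[(k + 1) % n] for k in range(n)]
--     cnt = {}
--     for v in s:
--         cnt[v] = cnt.get(v, 0) + 1
--     total = 0
--     for i in range(n):
--         x = arr[i]
--         c = cnt.get(x, 0)
--         if s[i - 1] == x:
--             c -= 1
--         if s[i] == x:
--             c -= 1
--         if arr[i - 1] + arr[(i + 1) % n] == x:
--             c += 1
--         total += c
--     return total
-- ===== Notes on version B (the rewrite author's own statement) =====
-- stated objective: faster
-- what changed: Instead of rotating the list n times and rescanning all n-1 adjacent pairs per rotation, B hash-counts the n circular adjacent-pair sums once and, for each removed element, takes that total count minus the two pair sums incident to it plus the bridge sum formed by its two neighbours.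
import Mathlib
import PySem

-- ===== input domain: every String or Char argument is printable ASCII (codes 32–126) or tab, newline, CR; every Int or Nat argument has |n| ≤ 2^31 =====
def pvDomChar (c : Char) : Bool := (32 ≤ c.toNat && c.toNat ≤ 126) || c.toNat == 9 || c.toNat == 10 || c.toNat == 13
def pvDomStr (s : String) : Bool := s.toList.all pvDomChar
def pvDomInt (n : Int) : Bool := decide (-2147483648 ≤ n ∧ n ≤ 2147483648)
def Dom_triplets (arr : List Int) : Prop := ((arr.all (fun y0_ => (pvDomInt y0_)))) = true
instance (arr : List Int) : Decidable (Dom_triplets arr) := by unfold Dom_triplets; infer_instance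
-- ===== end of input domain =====

-- B replaces A's O(n^2) rotate-and-rescan with a single O(n) pass over the hash-counted circular
-- adjacent-pair sums (per element: total count minus the two incident pair sums plus the bridge sum).
-- A pops/appends on its argument but restores it before returning; B does not touch it (same net effect).

-- ===== PORT A =====
-- A-side helper: one outer step of A (sum = arr[0]; arr.pop(0); scan j in range(n-1) of
-- arr[j]+arr[j-1]; arr.append(sum)).  arr[0]/pop(0) are in range whenever the loop body
-- runs (the list always has length n there), so A never raises; they are ported as pyGetD/tail.
def stepA (n : Nat) : (List Int × Int) → Nat → (List Int × Int) := fun st _i =>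
  let sum := PySem.List.pyGetD st.1 0 0
  let a := st.1.tail
  let count := (List.range (n - 1)).foldl (fun c (j : Nat) =>
    let sum2 := PySem.List.pyGetD a (j : Int) 0 + PySem.List.pyGetD a ((j : Int) - 1) 0
    if sum2 = sum then c + 1 else c) st.2
  (a ++ [sum], count)
def triplets (arr : List Int) : Int :=
  ((List.range arr.length).foldl (stepA arr.length) (arr, 0)).2

-- ===== PORT B =====
def triplets_alt (arr : List Int) : Int :=
  let n := arr.length
  let s := (List.range n).map (fun (k : Nat) =>
    PySem.List.pyGetD arr (k : Int) 0 + PySem.List.pyGetD arr (PySem.Int.mod ((k : Int) + 1) (n : Int)) 0)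
  let cnt := s.foldl (fun d v => d.modify v 0 (· + 1)) PySem.Dict.empty
  (List.range n).foldl (fun total (i : Nat) =>
    let x := PySem.List.pyGetD arr (i : Int) 0
    let c := cnt.getD x 0
    let c := if PySem.List.pyGetD s ((i : Int) - 1) 0 = x then c - 1 else c
    let c := if PySem.List.pyGetD s (i : Int) 0 = x then c - 1 else c
    let c := if PySem.List.pyGetD arr ((i : Int) - 1) 0 + PySem.List.pyGetD arr (PySem.Int.mod ((i : Int) + 1) (n : Int)) 0 = x then c + 1 else c
    total + c) 0

-- ===== PRECONDITION & SPEC =====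
def Spec_triplets (arr : List Int) (out : Int) : Prop := out = triplets_alt arr
instance (arr : List Int) (out : Int) : Decidable (Spec_triplets arr out) := by unfold Spec_triplets; infer_instance

-- ===== CLAIM (what is proved, stated in full; the proofs are below) =====
def Claim_equal_triplets : Prop := ∀ (arr : List Int), Dom_triplets arr → Spec_triplets arr (triplets arr)

-- ===== LEMMAS AND PROOFS =====

def chi (p : Prop) [Decidable p] : Int := if p then 1 else 0
def sval (arr : List Int) (k : Nat) : Int :=
  arr.getD (k % arr.length) 0 + arr.getD ((k + 1) % arr.length) 0
def aTerm (arr : List Int) (i : Nat) : Int :=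
  ((List.range (arr.length - 1)).countP (fun (j : Nat) =>
    decide (PySem.List.pyGetD (arr.rotate i).tail (j : Int) 0
      + PySem.List.pyGetD (arr.rotate i).tail ((j : Int) - 1) 0
      = PySem.List.pyGetD (arr.rotate i) 0 0)) : Int)
def bTerm (arr : List Int) (i : Nat) : Int :=
  (((List.range arr.length).map (fun k => sval arr k)).count (PySem.List.pyGetD arr (i : Int) 0) : Int)
  - chi (sval arr (i + arr.length - 1) = PySem.List.pyGetD arr (i : Int) 0)
  - chi (sval arr i = PySem.List.pyGetD arr (i : Int) 0)
  + chi (arr.getD ((i + arr.length - 1) % arr.length) 0 + arr.getD ((i + 1) % arr.length) 0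
      = PySem.List.pyGetD arr (i : Int) 0)

lemma rotate_one_eq (l : List Int) (h : l ≠ []) :
    l.rotate 1 = l.tail ++ [PySem.List.pyGetD l 0 0] := by
  cases l with
  | nil => exact absurd rfl h
  | cons x xs => simp [List.rotate_cons_succ, PySem.List.pyGetD_zero_cons]
lemma stepA_eq (arr : List Int) (i : Nat) (c : Int) (hi : i < arr.length) :
    stepA arr.length (arr.rotate i, c) i = (arr.rotate (i + 1), c + aTerm arr i) := by
  have hne : arr.rotate i ≠ [] := by
    intro h
    have hl := List.length_rotate arr i
    rw [h] at hl; simp at hl; omega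
  unfold stepA aTerm
  simp only [Prod.mk.injEq]
  constructor
  · rw [← rotate_one_eq _ hne, List.rotate_rotate]
  · rw [PySem.List.foldl_ite_add_one]
lemma A_fold (arr : List Int) (k : Nat) (hk : k ≤ arr.length) :
    (List.range k).foldl (stepA arr.length) (arr, 0)
      = (arr.rotate k, ∑ i ∈ Finset.range k, aTerm arr i) := by
  induction k with
  | zero => simp
  | succ k ih =>
    rw [List.range_succ, List.foldl_append, ih (by omega), List.foldl_cons, List.foldl_nil,
      stepA_eq arr k _ (by omega), Finset.sum_range_succ]
lemma A_char (arr : List Int) :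
    triplets arr = ∑ i ∈ Finset.range arr.length, aTerm arr i := by
  unfold triplets
  rw [A_fold arr arr.length le_rfl]


lemma sval_mod (arr : List Int) (k : Nat) :
    sval arr (k % arr.length) = sval arr k := by
  unfold sval
  rw [Nat.mod_mod]
  congr 1
  conv_rhs => rw [Nat.add_mod]
  rw [Nat.add_mod (k % arr.length) 1, Nat.mod_mod]

lemma sval_period (arr : List Int) (k : Nat) : sval arr (k + arr.length) = sval arr k := by
  unfold sval
  have h2 : (k + arr.length + 1) % arr.length = (k + 1) % arr.length := by
    rw [show k + arr.length + 1 = (k + 1) + arr.length by omega, Nat.add_mod_right]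
  rw [Nat.add_mod_right, h2]

lemma fval_eq (arr : List Int) (k : Nat) (hk : k < arr.length) :
    PySem.List.pyGetD arr (k : Int) 0
      + PySem.List.pyGetD arr (PySem.Int.mod ((k : Int) + 1) (arr.length : Int)) 0 = sval arr k := by
  rw [show ((k : Int) + 1) = (((k + 1 : Nat)) : Int) by push_cast; ring, PySem.Int.mod_natCast,
    PySem.List.pyGetD_natCast, PySem.List.pyGetD_natCast]
  unfold sval
  rw [Nat.mod_eq_of_lt hk]

lemma pyGetD_cyc (l : List Int) (i : Nat) (hi : i < l.length) :
    PySem.List.pyGetD l ((i : Int) - 1) 0 = l.getD ((i + l.length - 1) % l.length) 0 := by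
  cases i with
  | zero =>
    have hne : l ≠ [] := by intro h; rw [h] at hi; simp at hi
    rw [show ((0:Nat):Int) - 1 = -1 by norm_num, PySem.List.pyGetD_neg_one l 0 hne]
    rw [show (0:Nat) + l.length - 1 = l.length - 1 by omega, Nat.mod_eq_of_lt (by omega)]
    rw [List.getLast_eq_getElem, List.getD_eq_getElem?_getD, List.getElem?_eq_getElem (by omega)]
    rfl
  | succ k =>
    rw [show ((Nat.succ k : Nat):Int) - 1 = (k : Int) by push_cast; ring]
    rw [PySem.List.pyGetD_natCast]
    congr 1
    rw [show k + 1 + l.length - 1 = k + l.length by omega, Nat.add_mod_right, Nat.mod_eq_of_lt (by omega)]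

lemma countP_range_eq_sum (P : Nat → Prop) [DecidablePred P] (m : Nat) :
    (((List.range m).countP (fun j => decide (P j)) : Nat) : Int)
      = ∑ j ∈ Finset.range m, chi (P j) := by
  induction m with
  | zero => simp
  | succ m ih =>
    rw [List.range_succ, List.countP_append, Finset.sum_range_succ, ← ih]
    unfold chi
    by_cases h : P m <;> simp [h]

lemma count_range_map_eq_sum (f : Nat → Int) (x : Int) (n : Nat) :
    ((((List.range n).map f).count x : Nat) : Int) = ∑ k ∈ Finset.range n, chi (f k = x) := by
  rw [List.count_eq_countP, List.countP_map]
  rw [show ((fun a => a == x) ∘ f) = (fun j => decide (f j = x)) by funext j; rfl]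
  rw [countP_range_eq_sum]

lemma sum_map_range_eq (f : Nat → Int) (n : Nat) :
    ((List.range n).map f).sum = ∑ j ∈ Finset.range n, f j := rfl

lemma getD_map_range_sval (arr : List Int) (k : Nat) (hk : k < arr.length) :
    ((List.range arr.length).map (fun k => sval arr k)).getD k 0 = sval arr k := by
  simp [List.getD_eq_getElem?_getD, List.getElem?_map, List.getElem?_range hk]

lemma B_char (arr : List Int) :
    triplets_alt arr = ∑ i ∈ Finset.range arr.length, bTerm arr i := by
  unfold triplets_alt
  simp only []
  rw [PySem.List.foldl_add, sum_map_range_eq, zero_add]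
  apply Finset.sum_congr rfl
  intro i hi
  have hin : i < arr.length := Finset.mem_range.mp hi
  have hn : 0 < arr.length := by omega
  have hs : List.map (fun (k : Nat) => PySem.List.pyGetD arr (↑k) 0 + PySem.List.pyGetD arr (PySem.Int.mod (↑k + 1) ↑arr.length) 0) (List.range arr.length) = (List.range arr.length).map (fun k => sval arr k) :=
    List.map_congr_left (fun k hk => fval_eq arr k (List.mem_range.mp hk))
  rw [hs, ← PySem.Dict.counter_eq_foldl, PySem.Dict.getD_counter]
  rw [pyGetD_cyc ((List.range arr.length).map (fun k => sval arr k)) i (by simpa using hin)]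
  rw [pyGetD_cyc arr i hin]
  rw [show ((i:Int) + 1) = (((i+1 : Nat)) : Int) by push_cast; ring, PySem.Int.mod_natCast]
  simp only [PySem.List.pyGetD_natCast, List.length_map, List.length_range]
  rw [getD_map_range_sval arr i hin, getD_map_range_sval arr _ (Nat.mod_lt _ hn), sval_mod]
  unfold bTerm chi
  simp only [PySem.List.pyGetD_natCast]
  split_ifs <;> ring


lemma take_getD (l : List Int) (j i : Nat) (h : j < i) :
    (l.take i).getD j 0 = l.getD j 0 := by
  simp [List.getD_eq_getElem?_getD, List.getElem?_take_of_lt h]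

lemma drop_getD (l : List Int) (i j : Nat) :
    (l.drop i).getD j 0 = l.getD (i + j) 0 := by
  simp [List.getD_eq_getElem?_getD]

lemma rem_getD (arr : List Int) (i j : Nat) (hi : i < arr.length) (hj : j < arr.length - 1) :
    (arr.drop (i + 1) ++ arr.take i).getD j 0 = arr.getD ((i + 1 + j) % arr.length) 0 := by
  by_cases h : j < arr.length - i - 1
  · rw [List.getD_append _ _ _ j (by simp; omega), drop_getD,
      Nat.mod_eq_of_lt (by omega)]
  · rw [List.getD_append_right _ _ _ j (by simp; omega)]
    rw [show j - (arr.drop (i+1)).length = j - (arr.length - i - 1) by simp; omega]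
    rw [take_getD _ _ _ (by omega)]
    congr 1
    rw [Nat.mod_eq_sub_mod (by omega), Nat.mod_eq_of_lt (by omega)]
    omega

lemma sum_shift (f : Nat → Int) (n : Nat) (hper : ∀ m, f (m + n) = f m) (a : Nat) :
    ∑ j ∈ Finset.range n, f (a + j) = ∑ j ∈ Finset.range n, f j := by
  induction a with
  | zero => simp
  | succ a ih =>
    cases n with
    | zero => simp
    | succ m =>
      rw [← ih]
      rw [Finset.sum_range_succ, Finset.sum_range_succ']
      have h2 : ∀ j, a + 1 + j = a + (j + 1) := by omega
      simp only [h2]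
      rw [show a + (m + 1) = a + 0 + (m+1) by omega, hper (a+0)]

lemma getLast_eq_getD (l : List Int) (h : l ≠ []) : l.getLast h = l.getD (l.length - 1) 0 := by
  rw [List.getLast_eq_getElem, List.getD_eq_getElem?_getD, List.getElem?_eq_getElem (by
    cases l with | nil => exact absurd rfl h | cons a t => simp)]
  rfl

lemma per_index (arr : List Int) (i : Nat) (hi : i < arr.length) :
    aTerm arr i = bTerm arr i := by
  have harr : arr[i] = arr.getD i 0 := by
    rw [List.getD_eq_getElem?_getD, List.getElem?_eq_getElem hi]; rfl
  by_cases h2 : arr.length < 2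
  · -- n = 1
    have h1 : arr.length = 1 := by omega
    have hi0 : i = 0 := by omega
    subst hi0
    unfold aTerm bTerm sval chi
    rw [h1]
    simp [List.count_cons, PySem.List.pyGetD_natCast]
  · -- n ≥ 2
    have h2' : 2 ≤ arr.length := by omega
    have hrot : arr.rotate i = arr.getD i 0 :: (arr.drop (i+1) ++ arr.take i) := by
      rw [List.rotate_eq_drop_append_take (le_of_lt hi), List.drop_eq_getElem_cons hi, harr,
        List.cons_append]
    have hremlen : (arr.drop (i+1) ++ arr.take i).length = arr.length - 1 := by simp; omega
    have hremne : (arr.drop (i+1) ++ arr.take i) ≠ [] := by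
      intro hh; rw [hh] at hremlen; simp at hremlen; omega
    unfold aTerm
    rw [hrot]
    simp only [List.tail_cons, PySem.List.pyGetD_zero_cons]
    rw [countP_range_eq_sum]
    rw [show arr.length - 1 = (arr.length - 2) + 1 by omega, Finset.sum_range_succ']
    -- the j = 0 term is the bridge
    have h0 : chi (PySem.List.pyGetD (arr.drop (i+1) ++ arr.take i) ((0:Nat):Int) 0
        + PySem.List.pyGetD (arr.drop (i+1) ++ arr.take i) (((0:Nat):Int) - 1) 0 = arr.getD i 0)
        = chi (arr.getD ((i+1) % arr.length) 0 + arr.getD ((i + arr.length - 1) % arr.length) 0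
            = arr.getD i 0) := by
      rw [show (((0:Nat):Int) - 1) = -1 by norm_num, PySem.List.pyGetD_neg_one _ 0 hremne,
        getLast_eq_getD _ hremne, hremlen, PySem.List.pyGetD_natCast]
      rw [show arr.length - 1 - 1 = arr.length - 2 by omega]
      rw [rem_getD arr i _ hi (by omega), rem_getD arr i _ hi (by omega)]
      rw [show i + 1 + 0 = i + 1 by omega, show i + 1 + (arr.length - 2) = i + arr.length - 1 by omega]
    rw [h0]
    -- the remaining terms are shifted circular pair sums
    have hcong : ∀ j ∈ Finset.range (arr.length - 2),
        chi (PySem.List.pyGetD (arr.drop (i+1) ++ arr.take i) (((j+1:Nat)):Int) 0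
          + PySem.List.pyGetD (arr.drop (i+1) ++ arr.take i) ((((j+1:Nat)):Int) - 1) 0 = arr.getD i 0)
        = chi (sval arr (i + 1 + j) = arr.getD i 0) := by
      intro j hj
      have hjlt : j < arr.length - 2 := Finset.mem_range.mp hj
      rw [show (((j+1:Nat)):Int) - 1 = ((j:Nat):Int) by push_cast; ring,
        PySem.List.pyGetD_natCast, PySem.List.pyGetD_natCast,
        rem_getD arr i _ hi (by omega), rem_getD arr i _ hi (by omega)]
      unfold sval
      rw [show i + 1 + (j + 1) = (i + 1 + j) + 1 by omega, add_comm]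
    rw [Finset.sum_congr rfl hcong]
    -- core counting identity
    have key : (∑ j ∈ Finset.range (arr.length - 2), chi (sval arr (i + 1 + j) = arr.getD i 0))
        + chi (sval arr (i + arr.length - 1) = arr.getD i 0) + chi (sval arr i = arr.getD i 0)
        = ∑ k ∈ Finset.range arr.length, chi (sval arr k = arr.getD i 0) := by
      have h := sum_shift (fun m => chi (sval arr m = arr.getD i 0)) arr.length
        (fun m => by simp only [sval_period]) (i+1)
      rw [show arr.length = ((arr.length - 2) + 1) + 1 by omega] at h
      simp only [Finset.sum_range_succ] at h
      rw [show i + 1 + ((arr.length - 2) + 1) = i + arr.length by omega,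
        show i + 1 + (arr.length - 2) = i + arr.length - 1 by omega,
        sval_period arr i] at h
      have hR : ∑ k ∈ Finset.range arr.length, chi (sval arr k = arr.getD i 0)
          = ∑ k ∈ Finset.range (arr.length - 2), chi (sval arr k = arr.getD i 0)
            + chi (sval arr (arr.length - 2) = arr.getD i 0)
            + chi (sval arr ((arr.length - 2) + 1) = arr.getD i 0) := by
        rw [show arr.length = ((arr.length - 2) + 1) + 1 by omega, Finset.sum_range_succ,
          Finset.sum_range_succ]
        rw [show ((arr.length - 2) + 1) + 1 - 2 = arr.length - 2 by omega]
      linarith [h, hR]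
    unfold bTerm
    rw [count_range_map_eq_sum, PySem.List.pyGetD_natCast]
    rw [← key]
    have hbr : chi (arr.getD ((i+1) % arr.length) 0 + arr.getD ((i + arr.length - 1) % arr.length) 0
          = arr.getD i 0)
        = chi (arr.getD ((i + arr.length - 1) % arr.length) 0 + arr.getD ((i + 1) % arr.length) 0
          = arr.getD i 0) := by rw [add_comm (arr.getD ((i+1) % arr.length) 0)]
    rw [hbr]
    ring

-- ===== VERDICT (by name: the statement is the Claim_ definition above) =====
theorem triplets_spec : Claim_equal_triplets := by
  intro arr _
  unfold Spec_triplets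
  rw [A_char, B_char]
  exact Finset.sum_congr rfl (fun i hi => per_index arr i (Finset.mem_range.mp hi))
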